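-- pv_equiv track=rewrite | github.com/jade-carthans/reportr-development | features/code_quality/codeql_cwe_insights.py | analyze_security_scan
-- ===== SOURCE A (Python) =====
-- def analyze_security_scan(scan_results):
--     """Analyze security scan results and categorize issues by severity level."""
--     summary = {
--         "high": [],
--         "medium": [],
--         "low": [],
--         "info": []
--     }
--
--     for result in scan_results:
--         severity = result.get("severity", "info")
--         if severity not in summary:
--             severity = "info"
--         summary[severity].append(result)
--
--     return summary
-- ===== SOURCE B (Python) =====
-- def analyze_security_scan(scan_results):
--     """Analyze security scan results and categorize issues by severity level."""
--     levels = ["high", "medium", "low", "info"]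
--     results = list(scan_results)
--
--     def normalize(result):
--         severity = result.get("severity", "info")
--         return severity if severity in levels else "info"
--
--     return {level: [r for r in results if normalize(r) == level] for level in levels}
-- ===== Notes on version B (the rewrite author's own statement) =====
-- stated objective: alternative
-- what changed: Replaces the single-pass dispatch into a mutable 4-bucket dict by a dict comprehension that, for each severity level in a fixed order, filters the materialized result list for that level (four filtering passes, no mutation).
import Mathlib
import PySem

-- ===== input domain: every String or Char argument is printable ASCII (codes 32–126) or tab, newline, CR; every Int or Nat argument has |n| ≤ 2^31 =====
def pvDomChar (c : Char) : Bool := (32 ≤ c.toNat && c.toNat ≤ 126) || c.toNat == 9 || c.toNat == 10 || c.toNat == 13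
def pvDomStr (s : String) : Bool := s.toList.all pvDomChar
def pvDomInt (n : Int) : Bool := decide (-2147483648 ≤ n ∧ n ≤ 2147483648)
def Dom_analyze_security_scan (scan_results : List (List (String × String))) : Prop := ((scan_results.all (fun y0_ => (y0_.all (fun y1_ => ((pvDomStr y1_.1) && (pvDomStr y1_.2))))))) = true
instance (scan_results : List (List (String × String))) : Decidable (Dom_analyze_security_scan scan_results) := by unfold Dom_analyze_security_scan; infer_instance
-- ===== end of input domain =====

-- B replaces A's single-pass dispatch into a mutable 4-bucket dict by a per-level filter over the results (alternative decomposition, same cost).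

-- ===== PORT A =====
-- loop body of A: severity = result.get("severity","info"); if severity not in summary: severity = "info"; summary[severity].append(result)
def pvStepA (summary : PySem.Dict String (List (List (String × String)))) (result : List (String × String)) : PySem.Dict String (List (List (String × String))) :=
  let severity := (PySem.Dict.mk result).getD "severity" "info"
  let severity := if summary.contains severity then severity else "info"
  summary.modify severity [] (fun xs => xs ++ [result])

def analyze_security_scan (scan_results : List (List (String × String))) : List (String × List (List (String × String))) :=
  let summary : PySem.Dict String (List (List (String × String))) :=
    PySem.Dict.mk [("high", []), ("medium", []), ("low", []), ("info", [])]
  (scan_results.foldl pvStepA summary).items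

-- ===== PORT B =====
def pvLevels : List String := ["high", "medium", "low", "info"]

def pvNormalize (result : List (String × String)) : String :=
  let severity := (PySem.Dict.mk result).getD "severity" "info"
  if severity ∈ pvLevels then severity else "info"

def analyze_security_scan_alt (scan_results : List (List (String × String))) : List (String × List (List (String × String))) :=
  pvLevels.map (fun level => (level, scan_results.filter (fun r => pvNormalize r == level)))

-- ===== PRECONDITION & SPEC =====
def Spec_analyze_security_scan (scan_results : List (List (String × String))) (out : List (String × List (List (String × String)))) : Prop := out = analyze_security_scan_alt scan_results
instance (scan_results : List (List (String × String))) (out : List (String × List (List (String × String)))) : Decidable (Spec_analyze_security_scan scan_results out) := by unfold Spec_analyze_security_scan; infer_instance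

-- ===== CLAIM (what is proved, stated in full; the proofs are below) =====
def Claim_equal_analyze_security_scan : Prop := ∀ (scan_results : List (List (String × String))), Dom_analyze_security_scan scan_results → Spec_analyze_security_scan scan_results (analyze_security_scan scan_results)

-- ===== LEMMAS AND PROOFS =====

def pvFilt (l : String) (xs : List (List (String × String))) : List (List (String × String)) :=
  xs.filter (fun r => pvNormalize r == l)

lemma pvStepA_aux (s : String) (r : List (String × String))
    (a b c d : List (List (String × String))) :
    (PySem.Dict.mk [("high", a), ("medium", b), ("low", c), ("info", d)]).modify
        (if (PySem.Dict.mk [("high", a), ("medium", b), ("low", c), ("info", d)]).contains s then s else "info")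
        [] (fun xs => xs ++ [r]) =
      if (if s ∈ pvLevels then s else "info") = "high" then PySem.Dict.mk [("high", a ++ [r]), ("medium", b), ("low", c), ("info", d)]
      else if (if s ∈ pvLevels then s else "info") = "medium" then PySem.Dict.mk [("high", a), ("medium", b ++ [r]), ("low", c), ("info", d)]
      else if (if s ∈ pvLevels then s else "info") = "low" then PySem.Dict.mk [("high", a), ("medium", b), ("low", c ++ [r]), ("info", d)]
      else PySem.Dict.mk [("high", a), ("medium", b), ("low", c), ("info", d ++ [r])] := by
  by_cases h1 : s = "high"
  · subst h1; simp [pvLevels, PySem.Dict.contains, PySem.Dict.modify, PySem.Dict.getD, PySem.Dict.get?, PySem.Dict.insert]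
  · by_cases h2 : s = "medium"
    · subst h2; simp [pvLevels, PySem.Dict.contains, PySem.Dict.modify, PySem.Dict.getD, PySem.Dict.get?, PySem.Dict.insert]
    · by_cases h3 : s = "low"
      · subst h3; simp [pvLevels, PySem.Dict.contains, PySem.Dict.modify, PySem.Dict.getD, PySem.Dict.get?, PySem.Dict.insert]
      · by_cases h4 : s = "info"
        · subst h4; simp [pvLevels, PySem.Dict.contains, PySem.Dict.modify, PySem.Dict.getD, PySem.Dict.get?, PySem.Dict.insert]
        · simp [pvLevels, h1, h2, h3, h4, Ne.symm h1, Ne.symm h2, Ne.symm h3, Ne.symm h4, PySem.Dict.contains, PySem.Dict.modify, PySem.Dict.getD, PySem.Dict.get?, PySem.Dict.insert]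

lemma pvLoopA_invariant (xs : List (List (String × String)))
    (a b c d : List (List (String × String))) :
    xs.foldl pvStepA (PySem.Dict.mk [("high", a), ("medium", b), ("low", c), ("info", d)]) =
      PySem.Dict.mk [("high", a ++ pvFilt "high" xs), ("medium", b ++ pvFilt "medium" xs),
                     ("low", c ++ pvFilt "low" xs), ("info", d ++ pvFilt "info" xs)] := by
  induction xs generalizing a b c d with
  | nil => simp [pvFilt]
  | cons r xs ih =>
    have hstep : pvStepA (PySem.Dict.mk [("high", a), ("medium", b), ("low", c), ("info", d)]) r =
        if pvNormalize r = "high" then PySem.Dict.mk [("high", a ++ [r]), ("medium", b), ("low", c), ("info", d)]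
        else if pvNormalize r = "medium" then PySem.Dict.mk [("high", a), ("medium", b ++ [r]), ("low", c), ("info", d)]
        else if pvNormalize r = "low" then PySem.Dict.mk [("high", a), ("medium", b), ("low", c ++ [r]), ("info", d)]
        else PySem.Dict.mk [("high", a), ("medium", b), ("low", c), ("info", d ++ [r])] := by
      simp only [pvStepA, pvNormalize]
      exact pvStepA_aux ((PySem.Dict.mk r).getD "severity" "info") r a b c d
    simp only [List.foldl_cons, hstep]
    by_cases h1 : pvNormalize r = "high"
    · simp [h1, ih, pvFilt]
    · by_cases h2 : pvNormalize r = "medium"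
      · simp [h2, ih, pvFilt]
      · by_cases h3 : pvNormalize r = "low"
        · simp [h3, ih, pvFilt]
        · have hmem : pvNormalize r ∈ pvLevels := by
            by_cases hm : (PySem.Dict.mk r).getD "severity" "info" ∈ pvLevels
            · simp [pvNormalize, hm]
            · simp only [pvLevels, List.mem_cons, List.not_mem_nil, or_false] at hm
              push Not at hm
              simp [pvNormalize, pvLevels, hm.1, hm.2.1, hm.2.2.1, hm.2.2.2]
          have h4 : pvNormalize r = "info" := by
            simp only [pvLevels, List.mem_cons, List.not_mem_nil, or_false] at hmem
            rcases hmem with h | h | h | h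
            · exact absurd h h1
            · exact absurd h h2
            · exact absurd h h3
            · exact h
          simp [h4, ih, pvFilt]

-- ===== VERDICT (by name: the statement is the Claim_ definition above) =====
theorem analyze_security_scan_spec : Claim_equal_analyze_security_scan := by
  intro xs _
  unfold Spec_analyze_security_scan analyze_security_scan analyze_security_scan_alt
  simp only [pvLoopA_invariant, pvLevels, List.map_cons, List.map_nil]
  simp [pvFilt]
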